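-- pv_equiv track=rewrite | github.com/nickpurswani/fraud-resume-detection | src/fraud_detector.py | _get_job_level
-- ===== SOURCE A (Python) =====
-- def _get_job_level(title: str) -> int:
--     """Get numerical job level (0=intern, 10=C-level)"""
--     if not title:
--         return 0
--
--     title_lower = title.lower()
--
--     # C-level
--     if any(word in title_lower for word in ['ceo', 'cto', 'cfo', 'cmo', 'coo', 'chief']):
--         return 10
--
--     # VP level
--     elif 'vp' in title_lower or 'vice president' in title_lower:
--         return 9
--
--     # Director level
--     elif 'director' in title_lower:
--         return 8
--
--     # Manager level
--     elif 'manager' in title_lower: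
--         return 6
--
--     # Lead/Principal level
--     elif any(word in title_lower for word in ['lead', 'principal', 'architect']):
--         return 5
--
--     # Senior level
--     elif 'senior' in title_lower:
--         return 4
--
--     # Regular level
--     elif any(word in title_lower for word in ['engineer', 'developer', 'analyst', 'specialist']):
--         return 3
--
--     # Junior level
--     elif 'junior' in title_lower:
--         return 2
--
--     # Intern level
--     elif 'intern' in title_lower:
--         return 1
--
--     else:
--         return 3  # Default to regular level
-- ===== SOURCE B (Python) =====
-- # Keyword -> level map; levels are listed in decreasing order in A, so the
-- # first matching group is always the highest-valued match: take max of matches.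
-- KEYWORD_LEVELS = {
--     'ceo': 10, 'cto': 10, 'cfo': 10, 'cmo': 10, 'coo': 10, 'chief': 10,
--     'vp': 9, 'vice president': 9,
--     'director': 8,
--     'manager': 6,
--     'lead': 5, 'principal': 5, 'architect': 5,
--     'senior': 4,
--     'engineer': 3, 'developer': 3, 'analyst': 3, 'specialist': 3,
--     'junior': 2,
--     'intern': 1,
-- }
--
--
-- def _get_job_level(title: str) -> int:
--     """Get numerical job level (0=intern, 10=C-level)"""
--     if not title:
--         return 0
--     title_lower = title.lower()
--     return max((level for keyword, level in KEYWORD_LEVELS.items()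
--                 if keyword in title_lower), default=3)
-- ===== Notes on version B (the rewrite author's own statement) =====
-- stated objective: alternative
-- what changed: Replaced the priority-ordered if/elif first-match chain by an order-independent maximum over a keyword->level map: since A's levels strictly decrease down the chain, the first matching group is exactly the highest-valued matching keyword, so B returns max(level for matching keyword, default 3).
import Mathlib
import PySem

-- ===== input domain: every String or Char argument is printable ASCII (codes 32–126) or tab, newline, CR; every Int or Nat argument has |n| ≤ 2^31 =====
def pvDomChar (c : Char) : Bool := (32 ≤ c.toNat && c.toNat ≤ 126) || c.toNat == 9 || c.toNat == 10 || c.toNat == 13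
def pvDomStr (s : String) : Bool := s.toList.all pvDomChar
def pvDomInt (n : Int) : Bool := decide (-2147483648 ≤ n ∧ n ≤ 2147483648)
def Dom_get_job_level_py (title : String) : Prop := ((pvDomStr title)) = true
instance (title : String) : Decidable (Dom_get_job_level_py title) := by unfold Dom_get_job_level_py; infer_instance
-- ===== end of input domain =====

-- B replaces A's priority-ordered if/elif chain by an order-independent maximum over a
-- keyword->level map (valid because A's levels decrease down the chain); same cost.
-- ===== PORT A =====
def get_job_level_py (title : String) : Int :=
  if title = "" then 0
  else
    let title_lower := PySem.Str.lower title
    if ["ceo", "cto", "cfo", "cmo", "coo", "chief"].any (fun word => PySem.Str.isIn word title_lower) then 10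
    else if PySem.Str.isIn "vp" title_lower || PySem.Str.isIn "vice president" title_lower then 9
    else if PySem.Str.isIn "director" title_lower then 8
    else if PySem.Str.isIn "manager" title_lower then 6
    else if ["lead", "principal", "architect"].any (fun word => PySem.Str.isIn word title_lower) then 5
    else if PySem.Str.isIn "senior" title_lower then 4
    else if ["engineer", "developer", "analyst", "specialist"].any (fun word => PySem.Str.isIn word title_lower) then 3
    else if PySem.Str.isIn "junior" title_lower then 2
    else if PySem.Str.isIn "intern" title_lower then 1
    else 3

-- ===== PORT B =====
-- the KEYWORD_LEVELS dict in insertion order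
def pvKW : List (String × Int) :=
  [("ceo", 10), ("cto", 10), ("cfo", 10), ("cmo", 10), ("coo", 10), ("chief", 10),
   ("vp", 9), ("vice president", 9),
   ("director", 8),
   ("manager", 6),
   ("lead", 5), ("principal", 5), ("architect", 5),
   ("senior", 4),
   ("engineer", 3), ("developer", 3), ("analyst", 3), ("specialist", 3),
   ("junior", 2),
   ("intern", 1)]

def get_job_level_py_alt (title : String) : Int :=
  if title = "" then 0
  else
    let title_lower := PySem.Str.lower title
    -- max(level for keyword, level in KEYWORD_LEVELS.items() if keyword in title_lower, default=3)
    (PySem.List.max?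
      (pvKW.filterMap fun p => if PySem.Str.isIn p.1 title_lower then some p.2 else none)
      (fun x => x)).getD 3

-- ===== PRECONDITION & SPEC =====
def Spec_get_job_level_py (title : String) (out : Int) : Prop := out = get_job_level_py_alt title
instance (title : String) (out : Int) : Decidable (Spec_get_job_level_py title out) := by unfold Spec_get_job_level_py; infer_instance

-- ===== CLAIM =====
def Claim_equal_get_job_level_py : Prop := ∀ (title : String), Dom_get_job_level_py title → Spec_get_job_level_py title (get_job_level_py title)

-- ===== LEMMAS AND PROOFS =====

-- first-match scan over a keyword list (A's chain, keyword by keyword)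
def pvFM (t : String) : List (String × Int) → Int
  | [] => 3
  | (k, l) :: rest => if PySem.Str.isIn k t then l else pvFM t rest

theorem pv_if_or (a b : Prop) [Decidable a] [Decidable b] (x y : Int) :
    (if a ∨ b then x else y) = if a then x else if b then x else y := by
  by_cases a <;> by_cases b <;> simp [*]

theorem pv_foldl_max_eq (a : Int) (l : List Int) (h : ∀ x ∈ l, x ≤ a) :
    l.foldl max a = a := by
  induction l with
  | nil => rfl
  | cons x xs ih =>
    have hx : max a x = a := max_eq_left (h x (by simp))
    simp only [List.foldl_cons, hx]
    exact ih (fun y hy => h y (by simp [hy]))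

-- first match in a level-descending list = max of all matches (default 3 in both)
theorem pvMain (t : String) (L : List (String × Int))
    (hs : L.Pairwise (fun p q => q.2 ≤ p.2)) :
    pvFM t L =
      (PySem.List.max?
        (L.filterMap fun p => if PySem.Str.isIn p.1 t then some p.2 else none)
        (fun x => x)).getD 3 := by
  induction L with
  | nil => simp [pvFM, PySem.List.max?]
  | cons p rest ih =>
    obtain ⟨k, l⟩ := p
    have h1 : ∀ q ∈ rest, q.2 ≤ l := (List.pairwise_cons.mp hs).1
    have h2 := (List.pairwise_cons.mp hs).2
    have hbound : ∀ x ∈ rest.filterMap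
        (fun p => if PySem.Str.isIn p.1 t then some p.2 else none), x ≤ l := by
      intro x hx
      obtain ⟨q, hq, hqx⟩ := List.mem_filterMap.mp hx
      simp only [Option.ite_none_right_eq_some, Option.some.injEq] at hqx
      exact hqx.2 ▸ h1 q hq
    by_cases hb : PySem.Str.isIn k t = true
    · have hf : ((k, l) :: rest).filterMap
          (fun p => if PySem.Str.isIn p.1 t then some p.2 else none)
          = l :: rest.filterMap (fun p => if PySem.Str.isIn p.1 t then some p.2 else none) := by
        rw [List.filterMap_cons]
        simp only [hb, if_true]
      rw [hf, PySem.List.max?_id_cons, pv_foldl_max_eq l _ hbound]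
      simp only [pvFM, hb, if_true, Option.getD_some]
    · have hb' := eq_false_of_ne_true hb
      have hf : ((k, l) :: rest).filterMap
          (fun p => if PySem.Str.isIn p.1 t then some p.2 else none)
          = rest.filterMap (fun p => if PySem.Str.isIn p.1 t then some p.2 else none) := by
        rw [List.filterMap_cons]
        simp only [hb', Bool.false_eq_true, if_false]
      rw [hf]
      rw [show pvFM t ((k, l) :: rest) = pvFM t rest by
        simp only [pvFM, hb', Bool.false_eq_true, if_false]]
      exact ih h2

theorem pvKW_sorted : pvKW.Pairwise (fun p q => q.2 ≤ p.2) := by decide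

-- ===== VERDICT =====
theorem get_job_level_py_spec : Claim_equal_get_job_level_py := by
  intro title _
  unfold Spec_get_job_level_py get_job_level_py get_job_level_py_alt
  by_cases h : title = ""
  · simp [h]
  · simp only [if_neg h]
    rw [← pvMain (PySem.Str.lower title) pvKW pvKW_sorted]
    simp [pvFM, pvKW, pv_if_or]
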